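-- pv_equiv track=rewrite | github.com/pitcoz97/Bachelor-Degree-Thesis | Genetic algorithm for k-densest-overlapping-episodes/read_file.py | create_dates_index
-- ===== SOURCE A (Python) =====
-- def create_dates_index(dates):
-- 	new = {}
-- 	i = 0
-- 	for date in dates:
-- 		if date not in new:
-- 			new[date] = i
-- 			i += 1
-- 	return new
-- ===== SOURCE B (Python) =====
-- def create_dates_index(dates):
--     return {d: len(set(dates[:p])) for p, d in enumerate(dates) if d not in dates[:p]}
-- ===== Notes on version B (the rewrite author's own statement) =====
-- stated objective: alternative
-- what changed: B drops A's stateful loop (dict plus running counter) for a stateless per-position closed form: position p contributes its date iff the date is absent from the prefix dates[:p], and its index is the number of distinct dates in that prefix.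
import Mathlib
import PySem

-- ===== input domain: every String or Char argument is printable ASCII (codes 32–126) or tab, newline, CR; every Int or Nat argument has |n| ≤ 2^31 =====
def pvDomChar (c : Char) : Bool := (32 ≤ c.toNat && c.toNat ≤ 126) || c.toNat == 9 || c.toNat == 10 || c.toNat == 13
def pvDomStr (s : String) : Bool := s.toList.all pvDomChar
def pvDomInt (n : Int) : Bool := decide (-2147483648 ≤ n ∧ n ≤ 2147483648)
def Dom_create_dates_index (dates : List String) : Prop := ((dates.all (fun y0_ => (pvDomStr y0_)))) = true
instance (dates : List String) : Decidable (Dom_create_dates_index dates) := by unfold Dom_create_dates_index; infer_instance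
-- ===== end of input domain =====

-- B replaces A's stateful loop (dict + counter) by a stateless per-position closed form over prefixes (alternative; B is quadratic).

-- ===== PORT A =====
-- for date in dates: if date not in new: new[date] = i; i += 1  — state is (dict, i)
def create_dates_index (dates : List String) : List (String × Int) :=
  (dates.foldl
    (fun (st : PySem.Dict String Int × Int) date =>
      if st.1.contains date then st else (st.1.insert date st.2, st.2 + 1))
    (PySem.Dict.empty, 0)).1.items

-- ===== PORT B =====
-- {d: len(set(dates[:p])) for p, d in enumerate(dates) if d not in dates[:p]}
def create_dates_index_alt (dates : List String) : List (String × Int) :=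
  ((PySem.List.enumerate dates).foldl
    (fun (m : PySem.Dict String Int) pd =>
      if pd.2 ∈ PySem.List.slice dates none (some pd.1) then m
      else m.insert pd.2 ((PySem.Set.ofList (PySem.List.slice dates none (some pd.1))).length : Int))
    PySem.Dict.empty).items

-- ===== PRECONDITION & SPEC =====
def Spec_create_dates_index (dates : List String) (out : List (String × Int)) : Prop := out = create_dates_index_alt dates
instance (dates : List String) (out : List (String × Int)) : Decidable (Spec_create_dates_index dates out) := by unfold Spec_create_dates_index; infer_instance

-- ===== CLAIM (what is proved, stated in full; the proofs are below) =====
def Claim_equal_create_dates_index : Prop := ∀ (dates : List String), Dom_create_dates_index dates → Spec_create_dates_index dates (create_dates_index dates)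

-- ===== LEMMAS AND PROOFS =====

-- the elements of l not yet in `seen`, first occurrences in order (proof-only helper)
def pvFresh (seen l : List String) : List String :=
  match l with
  | [] => []
  | x :: xs => if x ∈ seen then pvFresh seen xs else x :: pvFresh (seen ++ [x]) xs

-- numbering u from i (proof-only helper)
def pvNum (u : List String) (i : Int) : List (String × Int) :=
  (PySem.List.enumerate u i).map (fun p => (p.2, p.1))

-- B's per-position view: pair each fresh element with the distinct-count of the prefix before it (proof-only helper)
def pvRank (pre l : List String) : List (String × Int) :=
  match l with
  | [] => []
  | x :: xs =>
    if x ∈ pre then pvRank (pre ++ [x]) xs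
    else (x, ((PySem.Set.ofList pre).length : Int)) :: pvRank (pre ++ [x]) xs

theorem pvMemAppend (pre : List String) (x : String) (hx : x ∈ pre) (a : String) :
    a ∈ pre ++ [x] ↔ a ∈ pre := by
  simp only [List.mem_append, List.mem_singleton]
  constructor
  · rintro (h | rfl)
    · exact h
    · exact hx
  · exact Or.inl

theorem pvNum_cons (x : String) (u : List String) (i : Int) :
    pvNum (x :: u) i = (x, i) :: pvNum u (i + 1) := by
  simp [pvNum, PySem.List.enumerate_cons]

theorem update_eq_append_pvFresh (l seen : List String) :
    PySem.Set.update seen l = seen ++ pvFresh seen l := by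
  induction l generalizing seen with
  | nil => simp [PySem.Set.update_nil, pvFresh]
  | cons x xs ih =>
    rw [PySem.Set.update_cons]
    by_cases hx : x ∈ seen
    · rw [PySem.Set.add_of_mem hx, ih]
      simp [pvFresh, hx]
    · rw [PySem.Set.add_of_not_mem hx, ih]
      simp [pvFresh, hx]

theorem pvFresh_nil_eq_dedup (l : List String) :
    pvFresh [] l = PySem.List.dedup l := by
  have h := update_eq_append_pvFresh l []
  rw [PySem.Set.update_nil_left] at h
  simpa [PySem.List.dedup_eq_ofList] using h.symm

theorem pvFresh_congr (l : List String) :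
    ∀ s t : List String, (∀ a, a ∈ s ↔ a ∈ t) → pvFresh s l = pvFresh t l := by
  induction l with
  | nil => intro s t _; rfl
  | cons x xs ih =>
    intro s t h
    by_cases hx : x ∈ s
    · simp only [pvFresh, if_pos hx, if_pos ((h x).mp hx)]
      exact ih s t h
    · simp only [pvFresh, if_neg hx, if_neg (fun hm => hx ((h x).mpr hm))]
      refine congrArg _ (ih (s ++ [x]) (t ++ [x]) ?_)
      intro a; simp [h a]

-- ===== A side =====

theorem A_fold_items (l : List String) :
    ∀ (d : PySem.Dict String Int) (i : Int), d.keys.Nodup →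
    (l.foldl
      (fun (st : PySem.Dict String Int × Int) date =>
        if st.1.contains date then st else (st.1.insert date st.2, st.2 + 1))
      (d, i)).1.items = d.items ++ pvNum (pvFresh d.keys l) i := by
  induction l with
  | nil => intro d i _; simp [pvFresh, pvNum, PySem.List.enumerate_nil]
  | cons x xs ih =>
    intro d i hnd
    by_cases hx : x ∈ d.keys
    · have hc : d.contains x = true := (PySem.Dict.contains_iff_mem_keys d x).mpr hx
      simp only [List.foldl_cons, hc, if_true]
      rw [ih d i hnd]
      simp [pvFresh, hx]
    · have hc : d.contains x = false := by
        rw [← Bool.not_eq_true]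
        exact fun h => hx ((PySem.Dict.contains_iff_mem_keys d x).mp h)
      simp only [List.foldl_cons, hc, Bool.false_eq_true, if_false]
      have hkeys : (d.insert x i).keys = d.keys ++ [x] :=
        PySem.Dict.keys_insert_of_not_contains d i hc
      have hnd' : (d.insert x i).keys.Nodup := PySem.Dict.nodup_keys_insert d x i hnd
      rw [ih (d.insert x i) (i + 1) hnd', PySem.Dict.items_insert_of_not_contains d i hc, hkeys]
      simp [pvFresh, hx, pvNum_cons]

theorem A_eq_num (dates : List String) :
    create_dates_index dates = pvNum (PySem.List.dedup dates) 0 := by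
  unfold create_dates_index
  rw [A_fold_items dates PySem.Dict.empty 0 PySem.Dict.nodup_keys_empty]
  simp [pvFresh_nil_eq_dedup, PySem.Dict.empty]

-- ===== B side =====

theorem pvRank_eq_num (l : List String) :
    ∀ pre : List String,
    pvRank pre l = pvNum (pvFresh pre l) ((PySem.Set.ofList pre).length : Int) := by
  induction l with
  | nil => intro pre; simp [pvRank, pvFresh, pvNum, PySem.List.enumerate_nil]
  | cons x xs ih =>
    intro pre
    have hof : PySem.Set.ofList (pre ++ [x]) = PySem.Set.add (PySem.Set.ofList pre) x :=
      PySem.Set.ofList_append_singleton pre x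
    by_cases hx : x ∈ pre
    · have hmem : x ∈ PySem.Set.ofList pre := (PySem.Set.mem_ofList pre x).mpr hx
      have hlen : PySem.Set.ofList (pre ++ [x]) = PySem.Set.ofList pre := by
        rw [hof, PySem.Set.add_of_mem hmem]
      simp only [pvRank, pvFresh, if_pos hx]
      rw [ih (pre ++ [x]), hlen,
        pvFresh_congr xs (pre ++ [x]) pre (pvMemAppend pre x hx)]
    · have hmem : x ∉ PySem.Set.ofList pre := fun h => hx ((PySem.Set.mem_ofList pre x).mp h)
      have hlen : (PySem.Set.ofList (pre ++ [x])).length = (PySem.Set.ofList pre).length + 1 := by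
        rw [hof, PySem.Set.add_of_not_mem hmem]; simp
      simp only [pvRank, pvFresh, if_neg hx]
      rw [ih (pre ++ [x]), pvNum_cons, hlen]
      push_cast
      ring_nf

theorem B_aux (l : List String) :
    ∀ (pre : List String) (m : PySem.Dict String Int), m.keys.Nodup →
    (∀ a, a ∈ m.keys ↔ a ∈ pre) →
    ((PySem.List.enumerate l (pre.length : Int)).foldl
      (fun (m : PySem.Dict String Int) pd =>
        if pd.2 ∈ PySem.List.slice (pre ++ l) none (some pd.1) then m
        else m.insert pd.2 ((PySem.Set.ofList (PySem.List.slice (pre ++ l) none (some pd.1))).length : Int))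
      m).items = m.items ++ pvRank pre l := by
  induction l with
  | nil => intro pre m _ _; simp [pvRank, PySem.List.enumerate_nil]
  | cons x xs ih =>
    intro pre m hnd hmem
    have hslice : PySem.List.slice (pre ++ x :: xs) none (some (pre.length : Int)) = pre := by
      rw [PySem.List.slice_to _ (by positivity)]
      simp
    rw [PySem.List.enumerate_cons, List.foldl_cons]
    by_cases hx : x ∈ pre
    · simp only [hslice, if_pos hx]
      have hre : pre ++ x :: xs = (pre ++ [x]) ++ xs := by simp
      have hlen : (pre.length : Int) + 1 = ((pre ++ [x]).length : Int) := by simp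
      rw [hlen]
      have := ih (pre ++ [x]) m hnd (fun a => (hmem a).trans (pvMemAppend pre x hx a).symm)
      rw [hre]
      rw [this]
      simp [pvRank, hx]
    · simp only [hslice, if_neg hx]
      have hc : m.contains x = false := by
        rw [← Bool.not_eq_true]
        intro h
        exact hx ((hmem x).mp ((PySem.Dict.contains_iff_mem_keys m x).mp h))
      have hnd' : (m.insert x ((PySem.Set.ofList pre).length : Int)).keys.Nodup :=
        PySem.Dict.nodup_keys_insert m x _ hnd
      have hmem' : ∀ a, a ∈ (m.insert x ((PySem.Set.ofList pre).length : Int)).keys ↔ a ∈ pre ++ [x] := by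
        intro a
        rw [PySem.Dict.mem_keys_insert]
        simp [hmem a]
        tauto
      have hre : pre ++ x :: xs = (pre ++ [x]) ++ xs := by simp
      have hlen : (pre.length : Int) + 1 = ((pre ++ [x]).length : Int) := by simp
      rw [hlen, hre, ih (pre ++ [x]) _ hnd' hmem',
        PySem.Dict.items_insert_of_not_contains m _ hc]
      simp [pvRank, hx]

theorem B_eq_num (dates : List String) :
    create_dates_index_alt dates = pvNum (PySem.List.dedup dates) 0 := by
  unfold create_dates_index_alt
  have h := B_aux dates [] PySem.Dict.empty PySem.Dict.nodup_keys_empty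
    (by intro a; simp [PySem.Dict.empty])
  simp only [List.nil_append, List.length_nil, Nat.cast_zero] at h
  rw [show PySem.List.enumerate dates = PySem.List.enumerate dates 0 from rfl, h]
  rw [pvRank_eq_num dates []]
  simp [PySem.Dict.empty, pvFresh_nil_eq_dedup, PySem.Set.ofList]

-- ===== VERDICT (by name: the statement is the Claim_ definition above) =====
theorem create_dates_index_spec : Claim_equal_create_dates_index := by
  intro dates _
  unfold Spec_create_dates_index
  rw [A_eq_num, B_eq_num]
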